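-- pv_equiv track=rewrite | github.com/fccc100/Leetcode | 2501-3000/2564-子字符串异或查询/python-2564/Solution.py | substringXorQueries
-- ===== SOURCE A (Python) =====
-- from typing import List
--
-- def substringXorQueries(s: str, queries: List[List[int]]) -> List[List[int]]:
--     m, n, res = len(s), len(queries), []
--     for p in queries:
--         x, y = p[0], p[1]
--         t = str(bin(x ^ y))[2:]
--         idx = s.find(t)
--         if idx == -1:
--             res.append([-1, -1])
--         else:
--             res.append([idx, idx + len(t) - 1])
--     return res
-- ===== SOURCE B (Python) =====
-- from typing import List
--
-- def substringXorQueries(s: str, queries: List[List[int]]) -> List[List[int]]: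
--     ts = [bin(p[0] ^ p[1])[2:] for p in queries]
--     L = 0
--     for t in ts:
--         L = max(L, len(t))
--     m = len(s)
--     first = {}
--     for i in range(m):
--         for l in range(1, min(L, m - i) + 1):
--             first.setdefault(s[i:i + l], i)
--     res = []
--     for t in ts:
--         i = first.get(t, -1)
--         if i < 0:
--             res.append([-1, -1])
--         else:
--             res.append([i, i + len(t) - 1])
--     return res
-- ===== Notes on version B (the rewrite author's own statement) =====
-- stated objective: alternative
-- what changed: Instead of running s.find once per query, B precomputes one dict mapping every substring of s of length up to the longest query pattern to its first start index, then answers each query with a single hash lookup; it trades the per-query scan for a one-time index build.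
import Mathlib
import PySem

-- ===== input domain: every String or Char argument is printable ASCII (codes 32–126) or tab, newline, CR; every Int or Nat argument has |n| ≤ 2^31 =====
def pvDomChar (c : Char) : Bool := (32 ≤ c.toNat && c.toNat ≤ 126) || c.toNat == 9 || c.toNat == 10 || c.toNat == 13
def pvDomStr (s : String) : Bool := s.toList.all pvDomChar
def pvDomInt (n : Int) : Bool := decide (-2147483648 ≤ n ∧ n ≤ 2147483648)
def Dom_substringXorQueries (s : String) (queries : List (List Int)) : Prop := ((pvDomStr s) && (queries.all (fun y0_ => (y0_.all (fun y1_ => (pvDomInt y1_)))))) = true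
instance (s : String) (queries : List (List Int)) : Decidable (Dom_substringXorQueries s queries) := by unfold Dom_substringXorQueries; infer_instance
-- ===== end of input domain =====

-- B replaces the per-query s.find scan by a different algorithm: one dictionary of all
-- substrings of s of length ≤ max pattern length, mapped to their first start index,
-- then a single lookup per query. Neither program mutates its arguments.

-- ===== PORT A =====
-- literal port of A; each query answered by s.find(bin(x^y)[2:])
def substringXorQueries (s : String) (queries : List (List Int)) : List (List Int) :=
  queries.foldl (fun res p =>
    let x := PySem.List.pyGetD p 0 0          -- p[0]  (in range under Pre_)
    let y := PySem.List.pyGetD p 1 0          -- p[1]  (in range under Pre_)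
    let t := PySem.Str.slice (PySem.Int.pyBin (PySem.Int.bxor x y)) (some 2) none
    let idx := PySem.Str.find s t
    if idx = -1 then res ++ [[-1, -1]]
    else res ++ [[idx, idx + PySem.Str.len t - 1]]) []

-- ===== PORT B =====
-- bin(p[0] ^ p[1])[2:] as a code-point list (strings are handled as their code-point lists; exact)
def pvBits (p : List Int) : List Char :=
  PySem.Chars.slice
    (PySem.Int.toBinChars0b (PySem.Int.bxor (PySem.List.pyGetD p 0 0) (PySem.List.pyGetD p 1 0)))
    (some 2) none

-- the dict built by B: first.setdefault(s[i:i+l], i) for i in range(m), l in range(1, min(L, m-i)+1)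
def pvFirst (cs : List Char) (L : Nat) : PySem.Dict (List Char) Int :=
  (List.range cs.length).foldl (fun d i =>
    (List.range' 1 (min L (cs.length - i))).foldl
      (fun d l => d.setdefault ((cs.drop i).take l) (i : Int)) d)
    PySem.Dict.empty

def substringXorQueries_alt (s : String) (queries : List (List Int)) : List (List Int) :=
  let cs := s.toList
  let ts := queries.map pvBits
  let L := ts.foldl (fun a t => max a t.length) 0
  let first := pvFirst cs L
  ts.foldl (fun res t =>
    let i := first.getD t (-1)
    if i < 0 then res ++ [[-1, -1]]
    else res ++ [[i, i + (t.length : Int) - 1]]) []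

-- ===== PRECONDITION & SPEC =====
-- Pre_ excludes queries with fewer than two entries, on which A raises IndexError at p[1]
def Pre_substringXorQueries (s : String) (queries : List (List Int)) : Prop :=
  ∀ p ∈ queries, 2 ≤ p.length
instance (s : String) (queries : List (List Int)) : Decidable (Pre_substringXorQueries s queries) := by unfold Pre_substringXorQueries; infer_instance
def pvWitness_substringXorQueries : String × List (List Int) := ("10110", [[1, 2], [5, 5]])

def Spec_substringXorQueries (s : String) (queries : List (List Int)) (out : List (List Int)) : Prop := out = substringXorQueries_alt s queries
instance (s : String) (queries : List (List Int)) (out : List (List Int)) : Decidable (Spec_substringXorQueries s queries out) := by unfold Spec_substringXorQueries; infer_instance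

-- ===== CLAIM (what is proved, stated in full; the proofs are below) =====
def Claim_equal_substringXorQueries : Prop := ∀ (s : String) (queries : List (List Int)), Dom_substringXorQueries s queries → Pre_substringXorQueries s queries → Spec_substringXorQueries s queries (substringXorQueries s queries)

-- ===== LEMMAS AND PROOFS =====

-- the pattern bin(x^y)[2:] is never empty
lemma pv_bits_len (p : List Int) : 1 ≤ (pvBits p).length := by
  have hslice : ∀ (xs : List Char), PySem.List.slice xs (some 2) none = xs.drop 2 := by
    intro xs
    rw [PySem.List.slice_from xs (by norm_num : (0:Int) ≤ 2)]
    rfl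
  unfold pvBits PySem.Int.toBinChars0b
  rw [PySem.Chars.slice_eq_listSlice]
  split
  · rw [hslice]
    simp only [List.drop_succ_cons, List.drop_zero, List.length_cons]
    omega
  · rw [hslice]
    simp only [List.drop_succ_cons, List.drop_zero]
    have := Nat.length_toDigits_pos (b := 2)
      (n := (PySem.Int.bxor (PySem.List.pyGetD p 0 0) (PySem.List.pyGetD p 1 0)).toNat)
    omega

-- the inner fold over l = 1..c (c ≤ |cs| - i): lookup afterwards
lemma pv_inner_get? (cs : List Char) (i c : Nat) (hc : c ≤ cs.length - i)
    (d : PySem.Dict (List Char) Int) (t : List Char) :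
    ((List.range' 1 c).foldl (fun d l => d.setdefault ((cs.drop i).take l) (i : Int)) d).get? t
      = if 1 ≤ t.length ∧ t.length ≤ c ∧ (cs.drop i).take t.length = t
        then some ((d.get? t).getD (i : Int)) else d.get? t := by
  induction c with
  | zero =>
    simp only [List.range'_zero, List.foldl_nil]
    rw [if_neg (by rintro ⟨h1, h2, -⟩; omega)]
  | succ c ih =>
    have hc' : c ≤ cs.length - i := by omega
    rw [List.range'_concat, List.foldl_append]
    simp only [List.foldl_cons, List.foldl_nil]
    set F := (List.range' 1 c).foldl (fun d l => d.setdefault ((cs.drop i).take l) (i : Int)) d with hF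
    have hkeylen : ((cs.drop i).take (1 + 1 * c)).length = c + 1 := by
      simp [List.length_take, List.length_drop]; omega
    by_cases ht : t = (cs.drop i).take (1 + 1 * c)
    · subst ht
      rw [PySem.Dict.get?_setdefault_self]
      have hlen : ((cs.drop i).take (1 + 1 * c)).length = c + 1 := hkeylen
      rw [ih hc']
      have hnot : ¬ (1 ≤ ((cs.drop i).take (1 + 1 * c)).length ∧
          ((cs.drop i).take (1 + 1 * c)).length ≤ c ∧
          (cs.drop i).take ((cs.drop i).take (1 + 1 * c)).length = (cs.drop i).take (1 + 1 * c)) := by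
        rw [hlen]; omega
      rw [if_neg hnot]
      have hyes : (1 ≤ ((cs.drop i).take (1 + 1 * c)).length ∧
          ((cs.drop i).take (1 + 1 * c)).length ≤ c + 1 ∧
          (cs.drop i).take ((cs.drop i).take (1 + 1 * c)).length = (cs.drop i).take (1 + 1 * c)) := by
        rw [hlen]; refine ⟨by omega, by omega, by rw [show c + 1 = 1 + 1 * c by omega]⟩
      rw [if_pos hyes]
    · rw [PySem.Dict.get?_setdefault_of_ne _ _ ht, ih hc']
      have hiff : (1 ≤ t.length ∧ t.length ≤ c + 1 ∧ (cs.drop i).take t.length = t) ↔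
          (1 ≤ t.length ∧ t.length ≤ c ∧ (cs.drop i).take t.length = t) := by
        constructor
        · rintro ⟨h1, h2, h3⟩
          refine ⟨h1, ?_, h3⟩
          rcases Nat.lt_or_ge t.length (c + 1) with h | h
          · omega
          · exfalso; apply ht
            have : t.length = c + 1 := by omega
            rw [this] at h3
            rw [← h3, show (1 : Nat) + 1 * c = c + 1 by omega]
        · rintro ⟨h1, h2, h3⟩; exact ⟨h1, by omega, h3⟩
      rw [if_congr hiff rfl rfl]

-- find? over range: explicit least-witness characterisation
lemma pv_find?_range {p : Nat → Bool} {m j : Nat} (hj : j < m) (hpj : p j = true)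
    (hmin : ∀ i < j, p i = false) : (List.range m).find? p = some j := by
  rw [List.find?_eq_some_iff_getElem]
  refine ⟨hpj, j, by simpa using hj, by simp, ?_⟩
  intro k hk
  simp only [List.getElem_range, Bool.not_eq_eq_eq_not, Bool.not_true]
  exact hmin k hk

-- the whole dict: lookup is the first start index with a match of length ≤ L
lemma pv_first_get? (cs : List Char) (L : Nat) (t : List Char) :
    (pvFirst cs L).get? t
      = ((List.range cs.length).find? (fun i =>
          decide (1 ≤ t.length ∧ t.length ≤ min L (cs.length - i) ∧ (cs.drop i).take t.length = t))).map
          (fun i => (i : Int)) := by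
  unfold pvFirst
  have aux : ∀ k, k ≤ cs.length →
      ((List.range k).foldl (fun d i =>
        (List.range' 1 (min L (cs.length - i))).foldl
          (fun d l => d.setdefault ((cs.drop i).take l) (i : Int)) d)
        PySem.Dict.empty).get? t
      = ((List.range k).find? (fun i =>
          decide (1 ≤ t.length ∧ t.length ≤ min L (cs.length - i) ∧ (cs.drop i).take t.length = t))).map
          (fun i => (i : Int)) := by
    intro k hk
    induction k with
    | zero => simp [pysem]
    | succ k ih =>
      have hk' : k ≤ cs.length := by omega
      rw [List.range_succ, List.foldl_append, List.find?_append]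
      simp only [List.foldl_cons, List.foldl_nil]
      rw [pv_inner_get? cs k (min L (cs.length - k)) (by omega) _ t, ih hk']
      rcases hfind : (List.range k).find? (fun i =>
          decide (1 ≤ t.length ∧ t.length ≤ min L (cs.length - i) ∧ (cs.drop i).take t.length = t)) with _ | j
      · simp only [Option.none_or]
        split
        · rename_i h
          rw [List.find?_cons_of_pos (by simpa using h)]
          simp
        · rename_i h
          rw [List.find?_cons_of_neg (by simpa using h)]
          simp
      · simp only [Option.some_or]
        split <;> simp
  exact aux cs.length le_rfl

-- dict lookup coincides with s.find for any nonempty pattern of length ≤ L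
lemma pv_lookup (cs : List Char) (L : Nat) (t : List Char)
    (h1 : 1 ≤ t.length) (hL : t.length ≤ L) :
    (pvFirst cs L).getD t (-1) = PySem.Chars.find cs t := by
  rw [PySem.Dict.getD_eq_get?_getD, pv_first_get?]
  by_cases hinf : t <:+: cs
  · -- found: find points at the first occurrence
    have hne : PySem.Chars.find cs t ≠ -1 := (PySem.Chars.find_ne_neg_one_iff cs t).mpr hinf
    have hnn : 0 ≤ PySem.Chars.find cs t := by
      have := PySem.Chars.neg_one_le_find cs t; omega
    obtain ⟨hpre, hminp⟩ := PySem.Chars.find_spec hnn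
    set j := (PySem.Chars.find cs t).toNat with hj
    have hjlen : t.length ≤ cs.length - j := by
      have := hpre.length_le; simp [List.length_drop] at this; omega
    have hjm : j < cs.length := by omega
    rw [pv_find?_range hjm (by
        simp only [decide_eq_true_eq]
        exact ⟨h1, by omega, (List.prefix_iff_eq_take.mp hpre).symm⟩)
      (fun i hij => by
        simp only [decide_eq_false_iff_not]
        rintro ⟨-, hlen, htake⟩
        exact hminp i hij (List.prefix_iff_eq_take.mpr htake.symm))]
    simp [hj, Int.toNat_of_nonneg hnn]
  · -- absent: find = -1 and no start index matches
    have hfneg : PySem.Chars.find cs t = -1 := (PySem.Chars.find_eq_neg_one_iff cs t).mpr hinf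
    have hnone : (List.range cs.length).find? (fun i =>
        decide (1 ≤ t.length ∧ t.length ≤ min L (cs.length - i) ∧ (cs.drop i).take t.length = t)) = none := by
      rw [List.find?_eq_none]
      intro i _
      simp only [decide_eq_true_eq]
      rintro ⟨-, -, htake⟩
      apply hinf
      have hpre : t <+: cs.drop i := List.prefix_iff_eq_take.mpr htake.symm
      rw [← PySem.Chars.isIn_iff_infix]
      rw [← PySem.Chars.exists_prefix_drop_iff_isIn]
      exact ⟨i, hpre⟩
    rw [hnone, hfneg]; rfl

-- ===== VERDICT (by name: the statement is the Claim_ definition above) =====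
theorem substringXorQueries_spec : Claim_equal_substringXorQueries := by
  unfold Claim_equal_substringXorQueries
  intro s queries _ _
  unfold Spec_substringXorQueries substringXorQueries substringXorQueries_alt
  set cs := s.toList with hcs
  set ts := queries.map pvBits with hts
  set L := ts.foldl (fun a t => max a t.length) 0 with hL
  -- turn both folds into maps
  have hA : queries.foldl (fun res p =>
      let x := PySem.List.pyGetD p 0 0
      let y := PySem.List.pyGetD p 1 0
      let t := PySem.Str.slice (PySem.Int.pyBin (PySem.Int.bxor x y)) (some 2) none
      let idx := PySem.Str.find s t
      if idx = -1 then res ++ [[-1, -1]]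
      else res ++ [[idx, idx + PySem.Str.len t - 1]]) []
      = queries.map (fun p =>
          if PySem.Chars.find cs (pvBits p) = -1 then [-1, -1]
          else [PySem.Chars.find cs (pvBits p),
                PySem.Chars.find cs (pvBits p) + ((pvBits p).length : Int) - 1]) := by
    have hstep : (fun (res : List (List Int)) (p : List Int) =>
        let x := PySem.List.pyGetD p 0 0
        let y := PySem.List.pyGetD p 1 0
        let t := PySem.Str.slice (PySem.Int.pyBin (PySem.Int.bxor x y)) (some 2) none
        let idx := PySem.Str.find s t
        if idx = -1 then res ++ [[-1, -1]]
        else res ++ [[idx, idx + PySem.Str.len t - 1]])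
        = (fun res p => res ++ [if PySem.Chars.find cs (pvBits p) = -1 then [-1, -1]
            else [PySem.Chars.find cs (pvBits p),
                  PySem.Chars.find cs (pvBits p) + ((pvBits p).length : Int) - 1]]) := by
      funext res p
      have htl : (PySem.Str.slice (PySem.Int.pyBin (PySem.Int.bxor (PySem.List.pyGetD p 0 0) (PySem.List.pyGetD p 1 0))) (some 2) none).toList = pvBits p := by
        rw [PySem.Str.toList_slice, PySem.Int.toList_pyBin]; rfl
      have hfind : PySem.Str.find s (PySem.Str.slice (PySem.Int.pyBin (PySem.Int.bxor (PySem.List.pyGetD p 0 0) (PySem.List.pyGetD p 1 0))) (some 2) none) = PySem.Chars.find cs (pvBits p) := by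
        rw [PySem.Str.find_eq, htl, hcs]
      have hlen : PySem.Str.len (PySem.Str.slice (PySem.Int.pyBin (PySem.Int.bxor (PySem.List.pyGetD p 0 0) (PySem.List.pyGetD p 1 0))) (some 2) none) = ((pvBits p).length : Int) := by
        rw [PySem.Str.len_eq, htl]
      dsimp only
      rw [hfind, hlen]
      split <;> rfl
    rw [hstep, PySem.List.foldl_append_singleton_eq_map, List.nil_append]
  rw [hA]
  -- B side
  have hB : ts.foldl (fun res t =>
      let i := (pvFirst cs L).getD t (-1)
      if i < 0 then res ++ [[-1, -1]]
      else res ++ [[i, i + (t.length : Int) - 1]]) []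
      = ts.map (fun t =>
          if (pvFirst cs L).getD t (-1) < 0 then [-1, -1]
          else [(pvFirst cs L).getD t (-1), (pvFirst cs L).getD t (-1) + (t.length : Int) - 1]) := by
    have hstep : (fun (res : List (List Int)) (t : List Char) =>
        let i := (pvFirst cs L).getD t (-1)
        if i < 0 then res ++ [[-1, -1]]
        else res ++ [[i, i + (t.length : Int) - 1]])
        = (fun res t => res ++ [if (pvFirst cs L).getD t (-1) < 0 then [-1, -1]
            else [(pvFirst cs L).getD t (-1), (pvFirst cs L).getD t (-1) + (t.length : Int) - 1]]) := by
      funext res t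
      dsimp only
      split <;> rfl
    rw [hstep, PySem.List.foldl_append_singleton_eq_map, List.nil_append]
  rw [hB, hts, List.map_map]
  -- pointwise
  apply List.map_congr_left
  intro p hp
  have hmem : pvBits p ∈ ts := hts ▸ List.mem_map_of_mem hp
  have hlenle : (pvBits p).length ≤ L := by
    have : (pvBits p).length ∈ ts.map List.length := List.mem_map_of_mem hmem
    have h2 := (PySem.List.le_foldl_max (ts.map List.length) 0).2 _ this
    rw [hL]
    simpa [List.foldl_map, hts] using h2
  have hlook : (pvFirst cs L).getD (pvBits p) (-1) = PySem.Chars.find cs (pvBits p) :=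
    pv_lookup cs L (pvBits p) (pv_bits_len p) hlenle
  have hge : -1 ≤ PySem.Chars.find cs (pvBits p) := PySem.Chars.neg_one_le_find cs (pvBits p)
  simp only [Function.comp_apply, hlook]
  by_cases hneg : PySem.Chars.find cs (pvBits p) = -1
  · rw [if_pos hneg, if_pos (by omega)]
  · rw [if_neg hneg, if_neg (by omega)]
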